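-- pv_equiv track=rewrite | github.com/kyletau67/SoftDev2 | 20_/work.py | punctremove
-- ===== SOURCE A (Python) =====
-- punct = """'".?@&#,;:-_*!()[]{}~"""
--
-- def punctremove(x):
--     if len(x) == 0:
--         return ""
--     if x[0] in punct:
--         x = x[1:]
--         x = punctremove(x)
--     if x[len(x)-1] in punct:
--         x = x[:-1]
--         x = punctremove(x)
--
--     return x.lower()
-- ===== SOURCE B (Python) =====
-- punct = """'".?@&#,;:-_*!()[]{}~"""
--
-- def punctremove(x):
--     # two-pointer scan instead of recursion; intentionally unguarded so an
--     # all-punctuation input raises IndexError exactly like the original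
--     if len(x) == 0:
--         return ""
--     i = 0
--     while x[i] in punct:
--         i += 1
--     j = len(x) - 1
--     while x[j] in punct:
--         j -= 1
--     return x[i:j+1].lower()
-- ===== Notes on version B (the rewrite author's own statement) =====
-- stated objective: alternative
-- what changed: Replaced the slice-and-recurse strip (each removed punctuation character rebuilds the string, re-enters the function and applies a redundant lower()) by a single two-pointer index scan that finds the first and last non-punctuation positions and lowercases one final slice.
import Mathlib
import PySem

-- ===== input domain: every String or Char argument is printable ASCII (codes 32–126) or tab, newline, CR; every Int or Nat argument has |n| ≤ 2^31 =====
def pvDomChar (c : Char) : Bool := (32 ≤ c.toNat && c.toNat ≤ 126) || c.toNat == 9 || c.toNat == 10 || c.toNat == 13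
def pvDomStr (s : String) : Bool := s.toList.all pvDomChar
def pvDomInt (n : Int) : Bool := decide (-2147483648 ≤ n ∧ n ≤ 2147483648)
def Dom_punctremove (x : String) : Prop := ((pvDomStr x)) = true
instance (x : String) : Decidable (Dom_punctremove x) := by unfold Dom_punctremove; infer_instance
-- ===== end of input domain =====

-- B replaces A's slice-and-recurse strip by a single two-pointer index scan with one final lower();
-- Pre_ excludes the non-empty all-punctuation inputs on which both Pythons raise IndexError.


-- the module constant punct
def pvPunct : List Char := "'\".?@&#,;:-_*!()[]{}~".toList

-- ===== PORT A =====
-- A's recursion, with a fuel parameter only to make it total (fuel = length + 1 always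
-- suffices, as the proofs below show); x[len(x)-1] on the empty string (Python: IndexError)
-- is read through pyGetD with a non-punctuation default — those inputs are outside Pre_.
def pmA : Nat → List Char → List Char
  | 0, _ => []
  | fuel+1, l =>
    if l.length = 0 then []
    else
      let l1 := if PySem.List.pyGetD l 0 ' ' ∈ pvPunct
                then pmA fuel (PySem.List.slice l (some 1) none) else l
      let l2 := if PySem.List.pyGetD l1 (PySem.List.len l1 - 1) ' ' ∈ pvPunct
                then pmA fuel (PySem.List.slice l1 none (some (-1))) else l1
      PySem.Chars.lower l2

def punctremove (x : String) : String :=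
  String.ofList (pmA (x.toList.length + 1) x.toList)

-- ===== PORT B =====
-- first while loop: advance i while x[i] in punct (out-of-range = Python IndexError, outside Pre_)
def pvScanF (l : List Char) (i : Nat) : Nat :=
  if h : i < l.length then
    if l[i] ∈ pvPunct then pvScanF l (i+1) else i
  else i
termination_by l.length - i

-- second while loop: decrement j while x[j] in punct (only reached when a non-punct char exists)
def pvScanB (l : List Char) (j : Int) : Int :=
  if h : 0 ≤ j ∧ j < (l.length : Int) then
    if l[j.toNat]'(by omega) ∈ pvPunct then pvScanB l (j-1) else j
  else j
termination_by (j+1).toNat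
decreasing_by omega

def punctremove_alt (x : String) : String :=
  let l := x.toList
  if l.length = 0 then ""
  else
    let i := pvScanF l 0
    let j := pvScanB l ((l.length : Int) - 1)
    String.ofList (PySem.Chars.lower (PySem.List.slice l (some (i : Int)) (some (j + 1))))

-- ===== PRECONDITION & SPEC =====
-- Pre_ excludes exactly the non-empty all-punctuation strings: there both A and B raise IndexError.
def Pre_punctremove (x : String) : Prop :=
  x.toList = [] ∨ x.toList.any (fun c => !(pvPunct.contains c)) = true
instance (x : String) : Decidable (Pre_punctremove x) := by unfold Pre_punctremove; infer_instance
def pvWitness_punctremove : String := "a"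

def Spec_punctremove (x : String) (out : String) : Prop := out = punctremove_alt x
instance (x : String) (out : String) : Decidable (Spec_punctremove x out) := by unfold Spec_punctremove; infer_instance

-- ===== CLAIM (what is proved, stated in full; the proofs are below) =====
def Claim_equal_punctremove : Prop := ∀ (x : String), Dom_punctremove x → Pre_punctremove x → Spec_punctremove x (punctremove x)

-- ===== LEMMAS AND PROOFS =====

-- the punctuation test as a Bool predicate, and both-ends strip as explicit functions
def pvP (c : Char) : Bool := decide (c ∈ pvPunct)
def pvLstrip (l : List Char) : List Char := l.dropWhile pvP
def pvRstrip (l : List Char) : List Char := (l.reverse.dropWhile pvP).reverse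
def pvStrip (l : List Char) : List Char := pvRstrip (pvLstrip l)

lemma toNat_ofNat_valid (n : Nat) (h : n.isValidChar) : (Char.ofNat n).toNat = n := by
  simp [Char.ofNat, h, Char.ofNatAux, Char.toNat]

lemma upper_toNat {c : Char} (h : PySem.Chars.isupper c = true) : 65 ≤ c.toNat ∧ c.toNat ≤ 90 := by
  simp [PySem.Chars.isupper] at h
  exact ⟨ge_iff_le.mp h.1, ge_iff_le.mp h.2⟩

lemma toNat_lower_upper {c : Char} (h : PySem.Chars.isupper c = true) :
    (PySem.Chars.lowerChar c).toNat = c.toNat + 32 := by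
  have hb := upper_toNat h
  rw [show PySem.Chars.lowerChar c = Char.ofNat (c.toNat + 32) by simp [PySem.Chars.lowerChar, h]]
  exact toNat_ofNat_valid _ (Or.inl (by omega))

lemma isupper_lower_false {c : Char} (h : PySem.Chars.isupper c = true) :
    PySem.Chars.isupper (PySem.Chars.lowerChar c) = false := by
  have hb := upper_toNat h
  have ht := toNat_lower_upper h
  apply Bool.and_eq_false_iff.mpr
  right
  apply decide_eq_false
  intro hle
  have h1 : (PySem.Chars.lowerChar c).toNat ≤ ('Z').toNat := hle
  have h2 : ('Z').toNat = 90 := rfl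
  omega

lemma lowerChar_not_upper {c : Char} (h : PySem.Chars.isupper c = false) :
    PySem.Chars.lowerChar c = c := by
  simp [PySem.Chars.lowerChar, h]

lemma lowerChar_idem (c : Char) : PySem.Chars.lowerChar (PySem.Chars.lowerChar c) = PySem.Chars.lowerChar c := by
  by_cases hu : PySem.Chars.isupper c = true
  · exact lowerChar_not_upper (isupper_lower_false hu)
  · simp [lowerChar_not_upper (eq_false_of_ne_true hu)]

lemma not_mem_punct_of_toNat {c : Char}
    (h : (65 ≤ c.toNat ∧ c.toNat ≤ 90) ∨ (97 ≤ c.toNat ∧ c.toNat ≤ 122)) : c ∉ pvPunct := by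
  intro hm
  have e : pvPunct = ['\'', '"', '.', '?', '@', '&', '#', ',', ';', ':', '-', '_', '*', '!', '(', ')', '[', ']', '{', '}', '~'] := by rfl
  rw [e] at hm
  fin_cases hm <;> revert h <;> decide

lemma lowerChar_punct (c : Char) : PySem.Chars.lowerChar c ∈ pvPunct ↔ c ∈ pvPunct := by
  by_cases hu : PySem.Chars.isupper c = true
  · have hb := upper_toNat hu
    have ht := toNat_lower_upper hu
    constructor
    · intro h; exact absurd h (not_mem_punct_of_toNat (Or.inr (by omega)))
    · intro h; exact absurd h (not_mem_punct_of_toNat (Or.inl (by omega)))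
  · rw [lowerChar_not_upper (eq_false_of_ne_true hu)]

lemma lower_lower (l : List Char) : PySem.Chars.lower (PySem.Chars.lower l) = PySem.Chars.lower l := by
  simp [PySem.Chars.lower, List.map_map, Function.comp_def, lowerChar_idem]

-- a non-punct element survives dropWhile
lemma exists_dropWhile {l : List Char} (h : ∃ c ∈ l, pvP c = false) :
    ∃ c ∈ l.dropWhile pvP, pvP c = false := by
  obtain ⟨c, hc, hpc⟩ := h
  have := (List.takeWhile_append_dropWhile (p := pvP) (l := l)).symm
  rw [this] at hc
  rcases List.mem_append.1 hc with h1 | h2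
  · exact absurd (List.mem_takeWhile_imp h1) (by simp [hpc])
  · exact ⟨c, h2, hpc⟩

lemma takeWhile_append_of_exists {u : List Char} (v : List Char)
    (h : ∃ x ∈ u, pvP x = false) : (u ++ v).takeWhile pvP = u.takeWhile pvP := by
  induction u with
  | nil => simp at h
  | cons a u ih =>
    by_cases ha : pvP a
    · simp only [List.cons_append, List.takeWhile_cons, ha]
      have : ∃ x ∈ u, pvP x = false := by
        obtain ⟨x, hx, hpx⟩ := h
        rcases List.mem_cons.1 hx with rfl | hx
        · simp [ha] at hpx
        · exact ⟨x, hx, hpx⟩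
      rw [ih this]
    · simp only [List.cons_append, List.takeWhile_cons, Bool.not_eq_true] at *
      simp [ha]

lemma pvRstrip_ne_nil {l : List Char} (h : ∃ c ∈ l, pvP c = false) : pvRstrip l ≠ [] := by
  simp only [pvRstrip, ne_eq, List.reverse_eq_nil_iff, List.dropWhile_eq_nil_iff]
  obtain ⟨c, hc, hpc⟩ := h
  intro hall
  have := hall c (by simp [hc])
  simp [hpc] at this

lemma pvStrip_ne_nil {l : List Char} (h : ∃ c ∈ l, pvP c = false) : pvStrip l ≠ [] :=
  pvRstrip_ne_nil (exists_dropWhile h)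

-- the last element of rstrip is non-punct
lemma reverse_eq_getLast_cons {l : List Char} (hne : l ≠ []) :
    l.reverse = l.getLast hne :: l.dropLast.reverse := by
  conv_lhs => rw [← List.dropLast_append_getLast hne]
  simp

lemma pvRstrip_getLast {l : List Char} :
    ∀ hne : pvRstrip l ≠ [], pvP ((pvRstrip l).getLast hne) = false := by
  intro hne
  unfold pvRstrip at hne ⊢
  rw [List.getLast_reverse]
  · exact List.head_dropWhile_not pvP _

-- rstrip drops a trailing punct char
lemma pvRstrip_dropLast {l : List Char} (hne : l ≠ []) (hl : pvP (l.getLast hne) = true) :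
    pvRstrip l = pvRstrip l.dropLast := by
  unfold pvRstrip
  rw [reverse_eq_getLast_cons hne, List.dropWhile_cons, hl]
  simp

-- rstrip keeps a non-punct trailing char
lemma pvRstrip_of_last {l : List Char} (hne : l ≠ []) (hl : pvP (l.getLast hne) = false) :
    pvRstrip l = l := by
  unfold pvRstrip
  rw [reverse_eq_getLast_cons hne, List.dropWhile_cons, hl]
  simp [← reverse_eq_getLast_cons hne]

lemma pyGetD_last {m : List Char} (hne : m ≠ []) :
    PySem.List.pyGetD m (PySem.List.len m - 1) ' ' = m.getLast hne := by
  have h1 : m.length ≠ 0 := by simpa using hne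
  have e : PySem.List.len m - 1 = ((m.length - 1 : Nat) : Int) := by
    simp [PySem.List.len_eq]; omega
  rw [e, PySem.List.pyGetD_natCast, List.getD_eq_getElem _ _ (by omega)]
  exact (List.getLast_eq_getElem hne).symm

lemma lower_ne_nil {m : List Char} (hne : m ≠ []) : PySem.Chars.lower m ≠ [] := by
  simp [PySem.Chars.lower, hne]

-- the last character of lower(strip(t)) is never punctuation (when t has a non-punct char)
lemma last_lower_strip {t : List Char} (hex : ∃ c ∈ t, pvP c = false)
    (hne : PySem.Chars.lower (pvStrip t) ≠ []) :
    ((PySem.Chars.lower (pvStrip t)).getLast hne) ∉ pvPunct := by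
  have hm : pvStrip t ≠ [] := pvStrip_ne_nil hex
  have e : (PySem.Chars.lower (pvStrip t)).getLast hne
      = PySem.Chars.lowerChar ((pvStrip t).getLast hm) := List.getLast_map hne
  rw [e]
  have hlast : pvP ((pvStrip t).getLast hm) = false := pvRstrip_getLast hm
  intro hmem
  rw [lowerChar_punct] at hmem
  simp [pvP, hmem] at hlast

-- ===== A-side characterisation =====
lemma pmA_eq : ∀ (fuel : Nat) (l : List Char), l.length < fuel →
    (∃ c ∈ l, pvP c = false) →
    pmA fuel l = PySem.Chars.lower (pvStrip l) := by
  intro fuel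
  induction fuel with
  | zero => intro l h hex; omega
  | succ fuel ih =>
    intro l hf hex
    cases l with
    | nil => simp at hex
    | cons c t =>
      have hlen0 : (c::t).length ≠ 0 := by simp
      rw [pmA]
      simp only [hlen0, reduceIte, PySem.List.pyGetD_zero_cons, PySem.List.slice_from_one,
        List.tail_cons]
      by_cases hc : c ∈ pvPunct
      · -- head is punctuation: recurse on t
        have hcP : pvP c = true := by simp [pvP, hc]
        have hext : ∃ x ∈ t, pvP x = false := by
          obtain ⟨x, hx, hpx⟩ := hex
          rcases List.mem_cons.1 hx with rfl | hx
          · rw [hcP] at hpx; cases hpx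
          · exact ⟨x, hx, hpx⟩
        have e1 : pmA fuel t = PySem.Chars.lower (pvStrip t) :=
          ih t (by simp at hf; omega) hext
        have estrip : pvStrip (c::t) = pvStrip t := by
          unfold pvStrip pvLstrip
          rw [List.dropWhile_cons, if_pos hcP]
        have hne2 : PySem.Chars.lower (pvStrip t) ≠ [] := lower_ne_nil (pvStrip_ne_nil hext)
        rw [if_pos hc, e1, pyGetD_last hne2, if_neg (last_lower_strip hext hne2),
          lower_lower, estrip]
      · -- head is not punctuation
        have hcP : pvP c = false := by simp [pvP, hc]
        have hne : (c::t) ≠ [] := by simp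
        have hlstrip : pvLstrip (c::t) = c::t := by
          unfold pvLstrip; rw [List.dropWhile_cons, if_neg (by simp [hcP])]
        rw [if_neg hc, pyGetD_last hne]
        by_cases hl : (c::t).getLast hne ∈ pvPunct
        · -- trailing punctuation: recurse on dropLast
          have hlP : pvP ((c::t).getLast hne) = true := by simp [pvP, hl]
          have ht : t ≠ [] := by
            rintro rfl; simp at hl; exact hc hl
          have hcd : (c::t).dropLast = c :: t.dropLast := List.dropLast_cons_of_ne_nil ht
          have hexd : ∃ x ∈ (c::t).dropLast, pvP x = false :=
            ⟨c, by rw [hcd]; exact List.mem_cons_self, hcP⟩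
          have e1 : pmA fuel (c::t).dropLast = PySem.Chars.lower (pvStrip (c::t).dropLast) :=
            ih _ (by simp [List.length_dropLast] at hf ⊢; omega) hexd
          have estrip : pvStrip (c::t) = pvStrip (c::t).dropLast := by
            unfold pvStrip
            rw [hlstrip]
            have hld : pvLstrip (c::t).dropLast = (c::t).dropLast := by
              unfold pvLstrip; rw [hcd, List.dropWhile_cons, if_neg (by simp [hcP])]
            rw [hld]
            exact pvRstrip_dropLast hne hlP
          have hne2 : PySem.Chars.lower (pvStrip (c::t).dropLast) ≠ [] :=
            lower_ne_nil (pvStrip_ne_nil hexd)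
          rw [if_pos hl, PySem.List.slice_to_neg_one, e1, lower_lower, estrip]
        · -- no trailing punctuation: the string is already stripped
          have hlP : pvP ((c::t).getLast hne) = false := by simp [pvP, hl]
          have estrip : pvStrip (c::t) = c::t := by
            unfold pvStrip
            rw [hlstrip]
            exact pvRstrip_of_last hne hlP
          rw [if_neg hl, estrip]

-- ===== B-side characterisation =====
lemma pvScanF_spec (l : List Char) : ∀ (i : Nat), (∃ c ∈ l.drop i, pvP c = false) →
    pvScanF l i = i + ((l.drop i).takeWhile pvP).length := by
  suffices H : ∀ (n i : Nat), l.length - i = n → (∃ c ∈ l.drop i, pvP c = false) →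
      pvScanF l i = i + ((l.drop i).takeWhile pvP).length from fun i => H _ i rfl
  intro n
  induction n with
  | zero =>
    intro i he hex
    have : l.drop i = [] := List.drop_eq_nil_iff.mpr (by omega)
    rw [this] at hex
    simp at hex
  | succ n ihn =>
    intro i he hex
    have hi : i < l.length := by
      by_contra hge
      rw [List.drop_eq_nil_iff.mpr (by omega)] at hex
      simp at hex
    have hdrop : l.drop i = l[i] :: l.drop (i+1) := List.drop_eq_getElem_cons hi
    rw [pvScanF, dif_pos hi]
    by_cases hp : l[i] ∈ pvPunct
    · have hpP : pvP l[i] = true := by simp [pvP, hp]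
      have hex' : ∃ c ∈ l.drop (i+1), pvP c = false := by
        obtain ⟨x, hx, hpx⟩ := hex
        rw [hdrop] at hx
        rcases List.mem_cons.1 hx with rfl | hx
        · rw [hpP] at hpx; cases hpx
        · exact ⟨x, hx, hpx⟩
      rw [if_pos hp, ihn (i+1) (by omega) hex', hdrop, List.takeWhile_cons, if_pos hpP]
      simp
      omega
    · have hpP : pvP l[i] = false := by simp [pvP, hp]
      rw [if_neg hp, hdrop, List.takeWhile_cons, if_neg (by simp [hpP])]
      simp

lemma pvScanB_append (m : List Char) (a : Char) :
    ∀ (j : Int), j < (m.length : Int) → pvScanB (m ++ [a]) j = pvScanB m j := by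
  suffices H : ∀ (n : Nat) (j : Int), (j+1).toNat = n → j < (m.length : Int) →
      pvScanB (m ++ [a]) j = pvScanB m j from fun j => H _ j rfl
  intro n
  induction n using Nat.strong_induction_on with
  | _ n ihn =>
    intro j he hj
    by_cases h0 : 0 ≤ j
    · have hr1 : 0 ≤ j ∧ j < ((m ++ [a]).length : Int) := ⟨h0, by simp; omega⟩
      have hr2 : 0 ≤ j ∧ j < (m.length : Int) := ⟨h0, hj⟩
      have hjn : j.toNat < m.length := by omega
      conv_lhs => rw [pvScanB]
      conv_rhs => rw [pvScanB]
      rw [dif_pos hr1, dif_pos hr2, List.getElem_append_left hjn]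
      by_cases hp : m[j.toNat] ∈ pvPunct
      · rw [if_pos hp, if_pos hp]
        exact ihn (j-1+1).toNat (by omega) (j-1) rfl (by omega)
      · rw [if_neg hp, if_neg hp]
    · conv_lhs => rw [pvScanB]
      conv_rhs => rw [pvScanB]
      rw [dif_neg (by omega), dif_neg (by omega)]

lemma pvScanB_spec : ∀ (l : List Char), (∃ c ∈ l, pvP c = false) →
    pvScanB l ((l.length : Int) - 1) = (l.length : Int) - 1 - ((l.reverse.takeWhile pvP).length : Int) := by
  intro l
  induction l using List.reverseRecOn with
  | nil => intro hex; simp at hex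
  | append_singleton m a ihm =>
    intro hex
    have hlen : ((m ++ [a]).length : Int) - 1 = (m.length : Int) := by simp
    have hr : 0 ≤ (m.length : Int) ∧ (m.length : Int) < ((m ++ [a]).length : Int) := by
      refine ⟨by omega, by simp⟩
    have htn : ((m.length : Int)).toNat = m.length := by omega
    rw [hlen, pvScanB, dif_pos hr]
    simp only [htn, List.getElem_concat_length]
    by_cases hp : a ∈ pvPunct
    · have hpP : pvP a = true := by simp [pvP, hp]
      have hex' : ∃ c ∈ m, pvP c = false := by
        obtain ⟨x, hx, hpx⟩ := hex
        rcases List.mem_append.1 hx with hx | hx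
        · exact ⟨x, hx, hpx⟩
        · simp at hx; subst hx; rw [hpP] at hpx; cases hpx
      rw [if_pos hp, pvScanB_append m a _ (by omega)]
      have e1 : (m.length : Int) - 1 = ((m.length : Int) - 1) := rfl
      rw [ihm hex']
      have : (m ++ [a]).reverse.takeWhile pvP = a :: m.reverse.takeWhile pvP := by
        rw [List.reverse_append]
        simp [hpP]
      rw [this]
      simp
      omega
    · have hpP : pvP a = false := by simp [pvP, hp]
      rw [if_neg hp]
      have : (m ++ [a]).reverse.takeWhile pvP = [] := by
        rw [List.reverse_append]
        simp [hpP]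
      rw [this]
      simp

lemma dropWhile_eq_drop (m : List Char) :
    m.dropWhile pvP = m.drop (m.takeWhile pvP).length := by
  calc m.dropWhile pvP
      = (m.takeWhile pvP ++ m.dropWhile pvP).drop (m.takeWhile pvP).length := List.drop_left.symm
    _ = m.drop (m.takeWhile pvP).length := by rw [List.takeWhile_append_dropWhile]

lemma rstrip_eq_take (m : List Char) :
    pvRstrip m = m.take (m.length - (m.reverse.takeWhile pvP).length) := by
  unfold pvRstrip
  rw [dropWhile_eq_drop, List.drop_reverse, List.reverse_reverse]


lemma alt_eq (l : List Char) (h : ∃ c ∈ l, pvP c = false) :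
    PySem.List.slice l (some ((pvScanF l 0 : Nat) : Int)) (some (pvScanB l ((l.length : Int) - 1) + 1))
      = pvStrip l := by
  have hF : pvScanF l 0 = (l.takeWhile pvP).length := by
    rw [pvScanF_spec l 0 (by simpa using h)]
    simp
  have hB := pvScanB_spec l h
  have htwr_le : (l.reverse.takeWhile pvP).length ≤ l.length := by
    have := List.Sublist.length_le (List.takeWhile_sublist (p := pvP) (l := l.reverse))
    simpa using this
  have hB1 : pvScanB l ((l.length : Int) - 1) + 1
      = ((l.length - (l.reverse.takeWhile pvP).length : Nat) : Int) := by
    rw [hB]; omega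
  rw [hF, hB1, PySem.List.slice_natCast]
  have hdrop : l.drop (l.takeWhile pvP).length = l.dropWhile pvP := (dropWhile_eq_drop l).symm
  have hlu : (l.takeWhile pvP).length + (l.dropWhile pvP).length = l.length := by
    have h2 := congrArg List.length (List.takeWhile_append_dropWhile (p := pvP) (l := l))
    rwa [List.length_append] at h2
  have hrev : l.reverse.takeWhile pvP = (l.dropWhile pvP).reverse.takeWhile pvP := by
    have hsplit : l.reverse = (l.dropWhile pvP).reverse ++ (l.takeWhile pvP).reverse := by
      conv_lhs => rw [← List.takeWhile_append_dropWhile (p := pvP) (l := l)]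
      rw [List.reverse_append]
    rw [hsplit]
    apply takeWhile_append_of_exists
    obtain ⟨c, hc, hpc⟩ := exists_dropWhile h
    exact ⟨c, by simpa using hc, hpc⟩
  have hstrip : pvStrip l
      = (l.dropWhile pvP).take ((l.dropWhile pvP).length - (l.reverse.takeWhile pvP).length) := by
    unfold pvStrip pvLstrip
    rw [rstrip_eq_take, ← hrev]
  rw [hdrop, hstrip]
  congr 1
  omega

-- ===== VERDICT (by name: the statement is the Claim_ definition above) =====
theorem punctremove_spec : Claim_equal_punctremove := by
  intro x _ hpre
  unfold Spec_punctremove punctremove punctremove_alt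
  rcases hpre with hnil | hex
  · simp [hnil, pmA]
  · have hex' : ∃ c ∈ x.toList, pvP c = false := by
      simp only [List.any_eq_true, Bool.not_eq_true'] at hex
      obtain ⟨c, hc, hpc⟩ := hex
      refine ⟨c, hc, ?_⟩
      simp only [pvP, decide_eq_false_iff_not]
      simpa using hpc
    have hne : x.toList ≠ [] := by intro h; rw [h] at hex'; simp at hex'
    have hlen : x.toList.length ≠ 0 := by simpa using hne
    simp only [hlen, reduceIte]
    rw [pmA_eq _ _ (Nat.lt_succ_self _) hex', alt_eq _ hex']
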